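-- pv_equiv track=rewrite | github.com/DivineJK/MyPythonLibrary | DynamicProgramming/RestrictedPermutation.py | countRestrictedPermutation
-- ===== SOURCE A (Python) =====
-- def countRestrictedPermutation(cond, m = int(1e9)+7):
--     n = len(cond) + 1
--     dp = [1]*(n+1)
--     dp[0] = 0
--     dp_prev = [1]*(n+1)
--     dp_prev[0] = 0
--     for i in range(2, n+1):
--         for j in range(1, i+1):
--             if cond[i-2] == -1:
--                 dp[j] = (dp[j-1] + dp_prev[j-1]) % m
--             elif cond[i-2] == 1:
--                 dp[j] = (dp[j-1] + dp_prev[i-1] - dp_prev[j-1]) % m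
--             else:
--                 dp[j] = (dp[j-1] + dp_prev[i-1]) % m
--             dp_prev[j-1] = dp[j-1]
--         dp_prev[i] = dp[i]
--         for j in range(i+1, n+1):
--             dp[j] = dp[j-1]
--             dp_prev[j] = dp[j]
--     return dp[n]
-- ===== SOURCE B (Python) =====
-- def countRestrictedPermutation(cond, m = int(1e9)+7):
--     # Inclusion-exclusion over "cut" positions (classical signed-binomial formula
--     # for permutations with a prescribed ascent/descent/free pattern):
--     # f[i] = sum over the last cut c (walking left while the gap holds only
--     # forced steps; each forced descent flips the sign; a cut is allowed at c
--     # unless cond[c-1] forces an ascent) of sign * f[c] * C(i, i-c); answer f[n].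
--     n = len(cond) + 1
--     # Pascal's triangle mod m
--     C = [[1]]
--     for i in range(1, n + 1):
--         prev = C[i - 1]
--         C.append([1] + [(prev[k - 1] + (prev[k] if k < i else 0)) % m
--                         for k in range(1, i + 1)])
--     f = [1] + [0] * n
--     for i in range(1, n + 1):
--         acc = 0
--         sign = 1
--         c = i - 1
--         while True:
--             if c == 0 or cond[c - 1] != -1:
--                 acc = (acc + sign * f[c] * C[i][i - c]) % m
--             if c == 0:
--                 break
--             t = cond[c - 1]
--             if t == 1:
--                 sign = -sign
--             elif t != -1:
--                 break
--             c -= 1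
--         f[i] = acc
--     return f[n]
-- ===== Notes on version B (the rewrite author's own statement) =====
-- stated objective: alternative
-- what changed: B abandons the rank-indexed row DP entirely: it uses the classical inclusion-exclusion (signed multinomial) formula for permutations with a prescribed ascent/descent/free pattern, computing f[i] as a signed sum of f[c]*C(i,i-c) over admissible last-cut positions c with binomials from a Pascal triangle, instead of A's per-rank prefix/suffix-sum table.
-- intended difference: On empty cond with m = 1 or m < 0 A returns the unreduced literal 1 (it skips the final % m for the trivial case), while B returns 1 % m (0 for m = 1), which is the intended count modulo m. — e.g. on countRestrictedPermutation([], 1): A returns 1, B returns 0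
-- outside the precondition, e.g. on countRestrictedPermutation([], 0): A returns 1, B raises ZeroDivisionError
import Mathlib
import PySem

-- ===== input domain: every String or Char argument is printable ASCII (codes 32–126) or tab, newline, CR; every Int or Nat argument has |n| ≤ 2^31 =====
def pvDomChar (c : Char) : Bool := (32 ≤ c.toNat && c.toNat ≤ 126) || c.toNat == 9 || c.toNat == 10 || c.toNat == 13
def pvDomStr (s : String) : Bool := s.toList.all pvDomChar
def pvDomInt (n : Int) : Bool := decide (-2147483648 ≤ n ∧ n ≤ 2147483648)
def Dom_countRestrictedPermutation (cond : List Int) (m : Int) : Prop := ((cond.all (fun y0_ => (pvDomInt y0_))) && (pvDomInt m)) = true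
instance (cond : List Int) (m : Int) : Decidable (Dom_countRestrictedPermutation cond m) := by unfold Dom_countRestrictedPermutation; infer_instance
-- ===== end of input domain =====

-- B replaces A's rank-indexed prefix/suffix-sum row DP by the classical
-- inclusion-exclusion (signed multinomial) formula over "cut" positions with
-- binomials from a Pascal triangle; a genuinely different algorithm of the
-- same asymptotic cost.

-- ===== PORT A =====
-- All list indices below are provably in range in the Python (j,i ≤ n < length);
-- `getD _ 0` / `set` are therefore exact ports of the Python subscripts.
def aInnerStep (c m : Int) (i : Nat) (s : List Int × List Int) (j : Nat) : List Int × List Int :=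
  let dp := s.1
  let dpp := s.2
  let v : Int :=
    if c = -1 then PySem.Int.mod (dp.getD (j-1) 0 + dpp.getD (j-1) 0) m
    else if c = 1 then PySem.Int.mod (dp.getD (j-1) 0 + dpp.getD (i-1) 0 - dpp.getD (j-1) 0) m
    else PySem.Int.mod (dp.getD (j-1) 0 + dpp.getD (i-1) 0) m
  let dp' := dp.set j v
  (dp', dpp.set (j-1) (dp'.getD (j-1) 0))

def aPadStep (s : List Int × List Int) (j : Nat) : List Int × List Int :=
  let dp' := s.1.set j (s.1.getD (j-1) 0)
  (dp', s.2.set j (dp'.getD j 0))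

def aOuterStep (cond : List Int) (m : Int) (n : Nat) (s : List Int × List Int) (i : Nat) :
    List Int × List Int :=
  let c := cond.getD (i-2) 0
  let s1 := (List.range' 1 i).foldl (aInnerStep c m i) s
  let s2 := (s1.1, s1.2.set i (s1.1.getD i 0))
  (List.range' (i+1) (n - i)).foldl aPadStep s2

def countRestrictedPermutation (cond : List Int) (m : Int) : Int :=
  let n : Nat := cond.length + 1
  let dp := (List.replicate (n+1) (1 : Int)).set 0 0
  let dpp := (List.replicate (n+1) (1 : Int)).set 0 0
  ((List.range' 2 (n-1)).foldl (aOuterStep cond m n) (dp, dpp)).1.getD n 0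

-- ===== PORT B =====
-- Pascal's triangle row i+1 from row i (the Python list comprehension).
def pascalRow (m : Int) (prev : List Int) (i : Nat) : List Int :=
  [1] ++ (List.range' 1 i).map (fun k =>
    PySem.Int.mod (prev.getD (k-1) 0 + (if k < i then prev.getD k 0 else 0)) m)

def pascalTri (m : Int) (n : Nat) : List (List Int) :=
  (List.range' 1 n).foldl (fun C i => C ++ [pascalRow m (C.getD (i-1) []) i]) [[1]]

-- the `while True` loop of Source B: walk the last-cut position c downward.
def bGo (cond : List Int) (m : Int) (f Ci : List Int) (i : Nat) : Nat → Int → Int → Int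
  | 0, sign, acc => PySem.Int.mod (acc + sign * f.getD 0 0 * Ci.getD i 0) m
  | c+1, sign, acc =>
      if cond.getD c 0 = -1 then bGo cond m f Ci i c sign acc
      else if cond.getD c 0 = 1 then
        bGo cond m f Ci i c (-sign)
          (PySem.Int.mod (acc + sign * f.getD (c+1) 0 * Ci.getD (i-(c+1)) 0) m)
      else PySem.Int.mod (acc + sign * f.getD (c+1) 0 * Ci.getD (i-(c+1)) 0) m

def countRestrictedPermutation_alt (cond : List Int) (m : Int) : Int :=
  let n : Nat := cond.length + 1
  let C := pascalTri m n
  let f := (List.range' 1 n).foldl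
    (fun f i => f.set i (bGo cond m f (C.getD i []) i (i-1) 1 0))
    ([1] ++ List.replicate n 0)
  f.getD n 0

-- ===== PRECONDITION & SPEC =====
-- Pre_ excludes m = 0: Python A raises ZeroDivisionError there for every nonempty cond
-- (and B raises for every cond, including the empty one on which A still returns 1).
def Pre_countRestrictedPermutation (cond : List Int) (m : Int) : Prop := m ≠ 0
instance (cond : List Int) (m : Int) : Decidable (Pre_countRestrictedPermutation cond m) := by
  unfold Pre_countRestrictedPermutation; infer_instance
def pvWitness_countRestrictedPermutation : List Int × Int := ([-1, 1, 0], 7)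

-- On empty cond with m = 1 or m < 0, A returns the unreduced literal 1 (it skips the final
-- % m in the trivial case) while B returns 1 % m — the count reduced modulo m, as intended.
def D_countRestrictedPermutation (cond : List Int) (m : Int) : Prop :=
  cond = [] ∧ (m = 1 ∨ m < 0)
instance (cond : List Int) (m : Int) : Decidable (D_countRestrictedPermutation cond m) := by
  unfold D_countRestrictedPermutation; infer_instance

def Spec_countRestrictedPermutation (cond : List Int) (m : Int) (out : Int) : Prop :=
  ¬ D_countRestrictedPermutation cond m → out = countRestrictedPermutation_alt cond m
instance (cond : List Int) (m : Int) (out : Int) :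
    Decidable (Spec_countRestrictedPermutation cond m out) := by
  unfold Spec_countRestrictedPermutation; infer_instance

def pvDiffWitness_countRestrictedPermutation : List Int × Int := ([], 1)
def pvDiffWitnessOut_countRestrictedPermutation : Int × Int := (1, 0)

-- ===== CLAIM (what is proved, stated in full; the proofs are below) =====
def Claim_unchanged_countRestrictedPermutation : Prop :=
  ∀ (cond : List Int) (m : Int), Dom_countRestrictedPermutation cond m →
    Pre_countRestrictedPermutation cond m →
    Spec_countRestrictedPermutation cond m (countRestrictedPermutation cond m)
def Claim_changed_countRestrictedPermutation : Prop :=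
  Dom_countRestrictedPermutation (pvDiffWitness_countRestrictedPermutation.1) (pvDiffWitness_countRestrictedPermutation.2) ∧
  Pre_countRestrictedPermutation (pvDiffWitness_countRestrictedPermutation.1) (pvDiffWitness_countRestrictedPermutation.2) ∧
  D_countRestrictedPermutation (pvDiffWitness_countRestrictedPermutation.1) (pvDiffWitness_countRestrictedPermutation.2) ∧
  countRestrictedPermutation (pvDiffWitness_countRestrictedPermutation.1) (pvDiffWitness_countRestrictedPermutation.2) = pvDiffWitnessOut_countRestrictedPermutation.1 ∧
  countRestrictedPermutation_alt (pvDiffWitness_countRestrictedPermutation.1) (pvDiffWitness_countRestrictedPermutation.2) = pvDiffWitnessOut_countRestrictedPermutation.2 ∧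
  pvDiffWitnessOut_countRestrictedPermutation.1 ≠ pvDiffWitnessOut_countRestrictedPermutation.2
def Claim_exact_countRestrictedPermutation : Prop :=
  ∀ (cond : List Int) (m : Int), Dom_countRestrictedPermutation cond m →
    Pre_countRestrictedPermutation cond m → D_countRestrictedPermutation cond m →
    countRestrictedPermutation cond m ≠ countRestrictedPermutation_alt cond m

-- ===== LEMMAS AND PROOFS =====

-- Python mod facts -------------------------------------------------------------

theorem pymod_modEq (a m : Int) : PySem.Int.mod a m ≡ a [ZMOD m] := by
  have h := PySem.Int.floordiv_mul_add_mod a m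
  have : m ∣ a - PySem.Int.mod a m := ⟨PySem.Int.floordiv a m, by linarith [mul_comm (PySem.Int.floordiv a m) m]⟩
  exact (Int.modEq_iff_dvd.mpr this)

theorem pymod_congr {a b m : Int} (hm : m ≠ 0) (h : a ≡ b [ZMOD m]) :
    PySem.Int.mod a m = PySem.Int.mod b m := by
  have h1 : PySem.Int.mod a m ≡ PySem.Int.mod b m [ZMOD m] :=
    ((pymod_modEq a m).trans h).trans (pymod_modEq b m).symm
  have hd : m ∣ PySem.Int.mod b m - PySem.Int.mod a m := Int.modEq_iff_dvd.mp h1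
  rcases lt_or_gt_of_ne hm with hneg | hpos
  · obtain ⟨b1l, b1r⟩ := PySem.Int.mod_neg_bounds a hneg
    obtain ⟨b2l, b2r⟩ := PySem.Int.mod_neg_bounds b hneg
    have := Int.eq_zero_of_abs_lt_dvd ((neg_dvd).mpr hd)
      (by rw [abs_lt]; constructor <;> linarith)
    linarith
  · have a1 := PySem.Int.mod_nonneg a hpos
    have a2 := PySem.Int.mod_lt a hpos
    have b1 := PySem.Int.mod_nonneg b hpos
    have b2 := PySem.Int.mod_lt b hpos
    have := Int.eq_zero_of_abs_lt_dvd hd (by rw [abs_lt]; constructor <;> linarith)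
    linarith

theorem pymod_small {a m : Int} (h0 : 0 ≤ a) (h1 : a < m) : PySem.Int.mod a m = a := by
  have hm : 0 < m := lt_of_le_of_lt h0 h1
  have hd : m ∣ a - PySem.Int.mod a m := Int.modEq_iff_dvd.mp (pymod_modEq a m)
  have b1 := PySem.Int.mod_nonneg a hm
  have b2 := PySem.Int.mod_lt a hm
  have := Int.eq_zero_of_abs_lt_dvd hd (by rw [abs_lt]; constructor <;> linarith)
  linarith

-- list getD/set helpers --------------------------------------------------------

theorem getD_set_eq (l : List Int) (i : Nat) (a : Int) (h : i < l.length) :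
    (l.set i a).getD i 0 = a := by
  simp [List.getD, h]

theorem getD_set_ne (l : List Int) (i j : Nat) (a : Int) (h : i ≠ j) :
    (l.set i a).getD j 0 = l.getD j 0 := by
  simp [List.getD, List.getElem?_set_ne h]

-- prefix sums ------------------------------------------------------------------

def S (row : List Int) (j : Nat) : Int := (row.take j).sum

theorem S_succ (row : List Int) (j : Nat) (h : j < row.length) :
    S row (j+1) = S row j + row.getD j 0 := by
  unfold S
  rw [List.take_add_one, List.sum_append, List.getD, List.getElem?_eq_getElem h]
  simp

theorem S_sum (row : List Int) : ∀ (k : Nat), k ≤ row.length →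
    S row k = ∑ a ∈ Finset.range k, row.getD a 0 := by
  intro k
  induction k with
  | zero => intro _; simp [S]
  | succ k ih =>
      intro hk
      rw [S_succ row k (by omega), ih (by omega), Finset.sum_range_succ]

-- the pure model of A's state --------------------------------------------------

def newv (m c : Int) (D : Nat → Int) (i : Nat) : Nat → Int
  | 0 => D 0
  | j+1 => PySem.Int.mod
      (if c = -1 then newv m c D i j + D j
       else if c = 1 then newv m c D i j + D (i-1) - D j
       else newv m c D i j + D (i-1)) m

def mstep (m c : Int) (i : Nat) (D : Nat → Int) : Nat → Int :=
  fun idx => newv m c D i (min idx i)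

def mrun (m : Int) : List Int → Nat → (Nat → Int) → (Nat → Int)
  | [], _, D => D
  | c :: cs, i, D => mrun m cs (i+1) (mstep m c i D)

def D0 : Nat → Int := fun idx => if idx = 0 then 0 else 1

-- A-side: the imperative loops compute the model -------------------------------

theorem inner_loop (m c : Int) (n i : Nat) (hi1 : 1 ≤ i) (hin : i ≤ n) (D : Nat → Int) :
    ∀ (r k : Nat), k + r = i → ∀ (dp dpp : List Int),
      dp.length = n+1 → dpp.length = n+1 →
      (∀ idx, idx ≤ n → dp.getD idx 0 = if 1 ≤ idx ∧ idx ≤ k then newv m c D i idx else D idx) →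
      (∀ idx, idx ≤ n → dpp.getD idx 0 = if idx < k then newv m c D i idx else D idx) →
      ((List.range' (k+1) r).foldl (aInnerStep c m i) (dp, dpp)).1.length = n+1 ∧
      ((List.range' (k+1) r).foldl (aInnerStep c m i) (dp, dpp)).2.length = n+1 ∧
      (∀ idx, idx ≤ n →
        ((List.range' (k+1) r).foldl (aInnerStep c m i) (dp, dpp)).1.getD idx 0 =
          if 1 ≤ idx ∧ idx ≤ i then newv m c D i idx else D idx) ∧
      (∀ idx, idx ≤ n →
        ((List.range' (k+1) r).foldl (aInnerStep c m i) (dp, dpp)).2.getD idx 0 =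
          if idx < i then newv m c D i idx else D idx) := by
  intro r
  induction r with
  | zero =>
      intro k hk dp dpp hdl hppl h1 h2
      have hki : k = i := by omega
      subst hki
      simp only [List.range'_zero, List.foldl_nil]
      exact ⟨hdl, hppl, h1, h2⟩
  | succ r ih =>
      intro k hk dp dpp hdl hppl h1 h2
      rw [List.range'_succ, List.foldl_cons]
      have hkn : k + 1 ≤ n := by omega
      -- the values read by this iteration
      have hdpk : dp.getD ((k+1)-1) 0 = newv m c D i k := by
        have hk' : (k+1)-1 = k := rfl
        rw [hk', h1 k (by omega)]
        rcases Nat.eq_zero_or_pos k with h0 | h0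
        · subst h0; simp [newv]
        · rw [if_pos ⟨h0, le_refl k⟩]
      have hppk : dpp.getD ((k+1)-1) 0 = D k := by
        have hk' : (k+1)-1 = k := rfl
        rw [hk', h2 k (by omega)]
        simp
      have hppi : dpp.getD (i-1) 0 = D (i-1) := by
        rw [h2 (i-1) (by omega)]
        have : ¬ (i-1 < k) := by omega
        simp [this]
      have hv :
          (if c = -1 then PySem.Int.mod (dp.getD ((k+1)-1) 0 + dpp.getD ((k+1)-1) 0) m
           else if c = 1 then
             PySem.Int.mod (dp.getD ((k+1)-1) 0 + dpp.getD (i-1) 0 - dpp.getD ((k+1)-1) 0) m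
           else PySem.Int.mod (dp.getD ((k+1)-1) 0 + dpp.getD (i-1) 0) m)
          = newv m c D i (k+1) := by
        rw [hdpk, hppk, hppi]
        simp only [newv]
        split_ifs <;> rfl
      have hstep : aInnerStep c m i (dp, dpp) (k+1) =
          (dp.set (k+1) (newv m c D i (k+1)),
           dpp.set k ((dp.set (k+1) (newv m c D i (k+1))).getD k 0)) := by
        show (dp.set (k+1) _, dpp.set ((k+1)-1) ((dp.set (k+1) _).getD ((k+1)-1) 0)) = _
        rw [hv]
        rfl
      rw [hstep]
      have hdget : (dp.set (k+1) (newv m c D i (k+1))).getD k 0 = newv m c D i k := by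
        rw [getD_set_ne _ _ _ _ (by omega), ← hdpk]
        rfl
      rw [hdget]
      refine ih (k+1) (by omega) _ _ (by simp [hdl]) (by simp [hppl]) ?_ ?_
      · intro idx hidx
        by_cases he : idx = k+1
        · subst he
          rw [getD_set_eq _ _ _ (by omega), if_pos ⟨by omega, le_refl (k+1)⟩]
        · rw [getD_set_ne _ _ _ _ (fun h => he h.symm), h1 idx hidx]
          split_ifs <;> first | rfl | omega
      · intro idx hidx
        by_cases he : idx = k
        · subst he
          rw [getD_set_eq _ _ _ (by omega), if_pos (by omega)]
        · rw [getD_set_ne _ _ _ _ (fun h => he h.symm), h2 idx hidx]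
          split_ifs <;> first | rfl | omega

theorem pad_loop (n i : Nat) (g D : Nat → Int) :
    ∀ (r k : Nat), i ≤ k → k + r = n → ∀ (dp dpp : List Int),
      dp.length = n+1 → dpp.length = n+1 →
      (∀ idx, idx ≤ n → dp.getD idx 0 = if idx ≤ k then g (min idx i) else D idx) →
      (∀ idx, idx ≤ n → dpp.getD idx 0 = if idx ≤ k then g (min idx i) else D idx) →
      ((List.range' (k+1) r).foldl aPadStep (dp, dpp)).1.length = n+1 ∧
      ((List.range' (k+1) r).foldl aPadStep (dp, dpp)).2.length = n+1 ∧
      (∀ idx, idx ≤ n →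
        ((List.range' (k+1) r).foldl aPadStep (dp, dpp)).1.getD idx 0 = g (min idx i)) ∧
      (∀ idx, idx ≤ n →
        ((List.range' (k+1) r).foldl aPadStep (dp, dpp)).2.getD idx 0 = g (min idx i)) := by
  intro r
  induction r with
  | zero =>
      intro k hik hk dp dpp hdl hppl h1 h2
      simp only [List.range'_zero, List.foldl_nil]
      refine ⟨hdl, hppl, ?_, ?_⟩
      · intro idx hidx; rw [h1 idx hidx, if_pos (by omega : idx ≤ k)]
      · intro idx hidx; rw [h2 idx hidx, if_pos (by omega : idx ≤ k)]
  | succ r ih =>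
      intro k hik hk dp dpp hdl hppl h1 h2
      rw [List.range'_succ, List.foldl_cons]
      have hkn : k + 1 ≤ n := by omega
      have hdpk : dp.getD ((k+1)-1) 0 = g i := by
        have hk' : (k+1)-1 = k := rfl
        rw [hk', h1 k (by omega), if_pos (le_refl k), Nat.min_eq_right hik]
      have hstep : aPadStep (dp, dpp) (k+1) =
          (dp.set (k+1) (g i),
           dpp.set (k+1) ((dp.set (k+1) (g i)).getD (k+1) 0)) := by
        show (dp.set (k+1) (dp.getD ((k+1)-1) 0), _) = _
        rw [hdpk]
      rw [hstep]
      have hdget : (dp.set (k+1) (g i)).getD (k+1) 0 = g i :=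
        getD_set_eq _ _ _ (by omega)
      rw [hdget]
      have hnew : ∀ (l : List Int), l.length = n+1 →
          (∀ idx, idx ≤ n → l.getD idx 0 = if idx ≤ k then g (min idx i) else D idx) →
          (∀ idx, idx ≤ n → (l.set (k+1) (g i)).getD idx 0 =
            if idx ≤ k+1 then g (min idx i) else D idx) := by
        intro l hl hptw idx hidx
        by_cases he : idx = k+1
        · subst he
          rw [getD_set_eq _ _ _ (by omega), if_pos (le_refl (k+1)),
              Nat.min_eq_right (by omega : i ≤ k+1)]
        · rw [getD_set_ne _ _ _ _ (fun h => he h.symm), hptw idx hidx]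
          split_ifs <;> first | rfl | omega
      exact ih (k+1) (by omega) (by omega) _ _ (by simp [hdl]) (by simp [hppl])
        (hnew dp hdl h1) (hnew dpp hppl h2)

theorem outer_step (cond : List Int) (m : Int) (n i : Nat) (h2 : 2 ≤ i) (hin : i ≤ n)
    (dp dpp : List Int) (hdp : dp.length = n+1) (hdpp : dpp.length = n+1) (D : Nat → Int)
    (h1 : ∀ idx, idx ≤ n → dp.getD idx 0 = D idx)
    (h2' : ∀ idx, idx ≤ n → dpp.getD idx 0 = D idx) :
    (aOuterStep cond m n (dp, dpp) i).1.length = n+1 ∧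
    (aOuterStep cond m n (dp, dpp) i).2.length = n+1 ∧
    (∀ idx, idx ≤ n → (aOuterStep cond m n (dp, dpp) i).1.getD idx 0 =
      mstep m (cond.getD (i-2) 0) i D idx) ∧
    (∀ idx, idx ≤ n → (aOuterStep cond m n (dp, dpp) i).2.getD idx 0 =
      mstep m (cond.getD (i-2) 0) i D idx) := by
  set c := cond.getD (i-2) 0 with hc
  obtain ⟨hl1, hl2, hp1, hp2⟩ := inner_loop m c n i (by omega) hin D i 0 (by omega) dp dpp
    hdp hdpp
    (by intro idx hidx; rw [h1 idx hidx]; split_ifs <;> first | rfl | omega)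
    (by intro idx hidx; rw [h2' idx hidx]; split_ifs <;> first | rfl | omega)
  set s1 := (List.range' 1 i).foldl (aInnerStep c m i) (dp, dpp) with hs1
  have hgi : s1.1.getD i 0 = newv m c D i i := by
    rw [hp1 i (by omega), if_pos ⟨by omega, le_refl i⟩]
  obtain ⟨ql1, ql2, qp1, qp2⟩ := pad_loop n i (newv m c D i) D (n - i) i (le_refl i)
    (by omega) s1.1 (s1.2.set i (s1.1.getD i 0)) hl1 (by simp [hl2])
    (by
      intro idx hidx
      rw [hp1 idx hidx]
      rcases Nat.eq_zero_or_pos idx with h0 | h0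
      · subst h0; simp [newv]
      · by_cases hle : idx ≤ i
        · rw [if_pos ⟨h0, hle⟩, if_pos hle, Nat.min_eq_left hle]
        · rw [if_neg (fun h => hle h.2), if_neg hle])
    (by
      intro idx hidx
      by_cases he : idx = i
      · subst he
        rw [hgi, getD_set_eq _ _ _ (by omega), if_pos (le_refl _), Nat.min_self]
      · rw [getD_set_ne _ _ _ _ (fun h => he h.symm), hp2 idx hidx]
        by_cases hlt : idx < i
        · rw [if_pos hlt, if_pos (by omega : idx ≤ i),
              Nat.min_eq_left (by omega : idx ≤ i)]
        · rw [if_neg hlt, if_neg (by omega : ¬ idx ≤ i)])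
  refine ⟨ql1, ql2, ?_, ?_⟩ <;> intro idx hidx
  · rw [show aOuterStep cond m n (dp, dpp) i =
        (List.range' (i+1) (n-i)).foldl aPadStep (s1.1, s1.2.set i (s1.1.getD i 0)) from rfl]
    exact qp1 idx hidx
  · rw [show aOuterStep cond m n (dp, dpp) i =
        (List.range' (i+1) (n-i)).foldl aPadStep (s1.1, s1.2.set i (s1.1.getD i 0)) from rfl]
    exact qp2 idx hidx

theorem outer_loop (cond : List Int) (m : Int) (n : Nat) (hn : n = cond.length + 1) :
    ∀ (cs : List Int) (i : Nat), 2 ≤ i → i + cs.length = n + 1 → cond.drop (i-2) = cs →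
      ∀ (dp dpp : List Int) (D : Nat → Int),
        dp.length = n+1 → dpp.length = n+1 →
        (∀ idx, idx ≤ n → dp.getD idx 0 = D idx) →
        (∀ idx, idx ≤ n → dpp.getD idx 0 = D idx) →
        (∀ idx, idx ≤ n →
          ((List.range' i cs.length).foldl (aOuterStep cond m n) (dp, dpp)).1.getD idx 0 =
            mrun m cs i D idx) := by
  intro cs
  induction cs with
  | nil =>
      intro i _ _ _ dp dpp D _ _ h1 _ idx hidx
      simpa using h1 idx hidx
  | cons c cs ih =>
      intro i hi2 hilen hdrop dp dpp D hdl hppl h1 h2 idx hidx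
      have hin : i ≤ n := by simp at hilen; omega
      have hc : cond.getD (i-2) 0 = c := by
        have : cond[i-2]? = (cond.drop (i-2))[0]? := by
          rw [List.getElem?_drop]
          norm_num
        rw [List.getD, this, hdrop]
        rfl
      obtain ⟨ql1, ql2, qp1, qp2⟩ := outer_step cond m n i hi2 hin dp dpp hdl hppl D h1 h2
      rw [hc] at qp1 qp2
      have hlen : (List.range' i (c :: cs).length) = i :: List.range' (i+1) cs.length := by
        rw [List.length_cons, List.range'_succ]
      rw [hlen, List.foldl_cons]
      have hdrop' : cond.drop (i+1-2) = cs := by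
        have e1 : i+1-2 = (i-2) + 1 := by omega
        rw [e1, ← List.drop_drop, hdrop]
        rfl
      have := ih (i+1) (by omega) (by simp at hilen ⊢; omega) hdrop'
        (aOuterStep cond m n (dp, dpp) i).1 (aOuterStep cond m n (dp, dpp) i).2
        (mstep m c i D) ql1 ql2 qp1 qp2 idx hidx
      rw [show ((aOuterStep cond m n (dp, dpp) i).1, (aOuterStep cond m n (dp, dpp) i).2) =
        aOuterStep cond m n (dp, dpp) i from rfl] at this
      exact this

theorem A_model (cond : List Int) (m : Int) :
    countRestrictedPermutation cond m = mrun m cond 2 D0 (cond.length + 1) := by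
  unfold countRestrictedPermutation
  have hinit : ∀ idx, idx ≤ cond.length + 1 →
      ((List.replicate (cond.length + 1 + 1) (1 : Int)).set 0 0).getD idx 0 = D0 idx := by
    intro idx hidx
    rcases Nat.eq_zero_or_pos idx with h0 | h0
    · subst h0
      rw [getD_set_eq _ _ _ (by simp)]
      rfl
    · rw [getD_set_ne _ _ _ _ (by omega)]
      have : (List.replicate (cond.length + 1 + 1) (1 : Int)).getD idx 0 = 1 := by
        rw [List.getD, List.getElem?_eq_getElem (by simp; omega)]
        simp
      rw [this]
      unfold D0
      rw [if_neg (by omega)]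
  have hrange : cond.length + 1 - 1 = cond.length := by omega
  have := outer_loop cond m (cond.length + 1) rfl cond 2 (le_refl 2) (by omega) rfl
    ((List.replicate (cond.length + 1 + 1) (1 : Int)).set 0 0)
    ((List.replicate (cond.length + 1 + 1) (1 : Int)).set 0 0)
    D0 (by simp) (by simp) hinit hinit (cond.length + 1) (le_refl _)
  simpa [hrange] using this

theorem mrun_mod (m : Int) :
    ∀ (cs : List Int) (i : Nat), 1 ≤ i → ∀ (D : Nat → Int),
      (∀ j, 1 ≤ j → ∃ x, D j = PySem.Int.mod x m) →
      ∀ j, 1 ≤ j → ∃ x, mrun m cs i D j = PySem.Int.mod x m := by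
  intro cs
  induction cs with
  | nil => intro i hi D h j hj; exact h j hj
  | cons c cs ih =>
      intro i hi D h j hj
      show ∃ x, mrun m cs (i+1) (mstep m c i D) j = PySem.Int.mod x m
      refine ih (i+1) (by omega) _ ?_ j hj
      intro j' hj'
      unfold mstep
      obtain ⟨k, hk⟩ : ∃ k, min j' i = k + 1 := ⟨min j' i - 1, by omega⟩
      rw [hk]
      exact ⟨_, rfl⟩

-- exact (unreduced) version of the row table, used as the bridge -----------------

def eStep (row : List Int) (c : Int) : List Int :=
  (List.range (row.length + 1)).map (fun j =>
    if c = -1 then S row j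
    else if c = 1 then S row row.length - S row j
    else S row row.length)

theorem eStep_length (row : List Int) (c : Int) : (eStep row c).length = row.length + 1 := by
  simp [eStep]

theorem eStep_entry (row : List Int) (c : Int) (j : Nat) (hj : j ≤ row.length) :
    (eStep row c).getD j 0 =
      (if c = -1 then S row j
       else if c = 1 then S row row.length - S row j
       else S row row.length) := by
  unfold eStep
  rw [List.getD, List.getElem?_map, List.getElem?_range (by omega)]
  rfl

theorem rows_lengthE : ∀ (cs row : List Int),
    (cs.foldl eStep row).length = row.length + cs.length := by
  intro cs
  induction cs with
  | nil => intro row; simp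
  | cons c cs ih =>
      intro row
      rw [List.foldl_cons, ih, eStep_length]
      simp
      omega

-- A's modded model is congruent to the exact rows --------------------------------

theorem mstep_congrE (m c : Int) (D : Nat → Int) (row : List Int)
    (h : ∀ j, j ≤ row.length → D j ≡ S row j [ZMOD m]) :
    ∀ j, j ≤ (eStep row c).length →
      mstep m c (row.length + 1) D j ≡ S (eStep row c) j [ZMOD m] := by
  have key : ∀ j, j ≤ row.length + 1 →
      newv m c D (row.length + 1) j ≡ S (eStep row c) j [ZMOD m] := by
    intro j
    induction j with
    | zero =>
        intro _
        have h0 := h 0 (Nat.zero_le _)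
        simpa [newv, S] using h0
    | succ j ih =>
        intro hj
        have hjr : j ≤ row.length := by omega
        have hnv := ih (by omega)
        have hent := eStep_entry row c j hjr
        have htot := h row.length (le_refl _)
        have hDj := h j hjr
        have hS := S_succ (eStep row c) j (by rw [eStep_length]; omega)
        rw [hS, hent]
        simp only [newv]
        have hd1 : row.length + 1 - 1 = row.length := by omega
        rw [hd1]
        refine (pymod_modEq _ m).trans ?_
        split_ifs with h1 h2
        · exact Int.ModEq.add hnv hDj
        · have step1 : newv m c D (row.length + 1) j + D row.length - D j ≡
              S (eStep row c) j + S row row.length - S row j [ZMOD m] :=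
            (hnv.add htot).sub hDj
          have e : S (eStep row c) j + S row row.length - S row j =
              S (eStep row c) j + (S row row.length - S row j) := by ring
          rw [← e]
          exact step1
        · exact hnv.add htot
  intro j hj
  rw [eStep_length] at hj
  have hmin : min j (row.length + 1) = j := by omega
  unfold mstep
  rw [hmin]
  exact key j hj

theorem model_congrE (m : Int) :
    ∀ (cs : List Int) (D : Nat → Int) (row : List Int),
      (∀ j, j ≤ row.length → D j ≡ S row j [ZMOD m]) →
      ∀ j, j ≤ (cs.foldl eStep row).length →
        mrun m cs (row.length + 1) D j ≡ S (cs.foldl eStep row) j [ZMOD m] := by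
  intro cs
  induction cs with
  | nil => intro D row h j hj; exact h j hj
  | cons c cs ih =>
      intro D row h j hj
      show mrun m cs (row.length + 1 + 1) (mstep m c (row.length + 1) D) j ≡ _ [ZMOD m]
      have hlen : row.length + 1 + 1 = (eStep row c).length + 1 := by
        rw [eStep_length]
      rw [hlen]
      refine ih (mstep m c (row.length + 1) D) (eStep row c) ?_ j (by simpa using hj)
      intro j' hj'
      exact mstep_congrE m c D row h j' hj'

-- the exact inclusion-exclusion quantity ----------------------------------------

def ch (a b : Nat) : Int := (a.choose b : Int)

def gsumE (cond : List Int) (F w : Nat → Int) : Int → Nat → Int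
  | sign, 0 => sign * F 0 * w 0
  | sign, c+1 =>
      if cond.getD c 0 = -1 then gsumE cond F w sign c
      else if cond.getD c 0 = 1 then
        sign * F (c+1) * w (c+1) + gsumE cond F w (-sign) c
      else sign * F (c+1) * w (c+1)

def FlE (cond : List Int) : Nat → List Int
  | 0 => [1]
  | i+1 => FlE cond i ++
      [gsumE cond (fun c => (FlE cond i).getD c 0) (fun c => ch (i+1) (i+1-c)) 1 i]

def Fv (cond : List Int) (i : Nat) : Int := (FlE cond i).getD i 0

theorem FlE_length (cond : List Int) : ∀ i, (FlE cond i).length = i + 1 := by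
  intro i
  induction i with
  | zero => rfl
  | succ i ih => simp [FlE, ih]

theorem gsumE_congr (cond : List Int) (F F' w w' : Nat → Int)
    : ∀ (c : Nat) (sign : Int), (∀ x, x ≤ c → F x = F' x) → (∀ x, x ≤ c → w x = w' x) →
      gsumE cond F w sign c = gsumE cond F' w' sign c := by
  intro c
  induction c with
  | zero =>
      intro sign hF hw
      simp only [gsumE]
      rw [hF 0 (le_refl 0), hw 0 (le_refl 0)]
  | succ c ih =>
      intro sign hF hw
      simp only [gsumE]
      split_ifs
      · exact ih sign (fun x hx => hF x (by omega)) (fun x hx => hw x (by omega))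
      · rw [hF (c+1) (le_refl _), hw (c+1) (le_refl _),
            ih (-sign) (fun x hx => hF x (by omega)) (fun x hx => hw x (by omega))]
      · rw [hF (c+1) (le_refl _), hw (c+1) (le_refl _)]

theorem FlE_prefix (cond : List Int) : ∀ i c, c ≤ i → (FlE cond i).getD c 0 = Fv cond c := by
  intro i
  induction i with
  | zero => intro c hc; interval_cases c; rfl
  | succ i ih =>
      intro c hc
      by_cases he : c = i + 1
      · subst he; rfl
      · have hci : c ≤ i := by omega
        show (FlE cond i ++ _).getD c 0 = Fv cond c
        rw [List.getD_append _ _ _ _ (by rw [FlE_length]; omega)]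
        exact ih c hci

theorem Fv_succ (cond : List Int) (i : Nat) :
    Fv cond (i+1) = gsumE cond (Fv cond) (fun c => ch (i+1) (i+1-c)) 1 i := by
  show (FlE cond i ++ _).getD (i+1) 0 = _
  rw [List.getD_append_right _ _ _ _ (by rw [FlE_length])]
  rw [FlE_length]
  simp only [Nat.sub_self, List.getD_cons_zero]
  exact gsumE_congr cond _ _ _ _ i 1 (fun x hx => FlE_prefix cond i x hx) (fun x _ => rfl)

theorem gsumE_neg (cond : List Int) (F w : Nat → Int) :
    ∀ (c : Nat) (sign : Int), gsumE cond F w (-sign) c = -(gsumE cond F w sign c) := by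
  intro c
  induction c with
  | zero =>
      intro sign
      show (-sign) * F 0 * w 0 = -(sign * F 0 * w 0)
      ring
  | succ c ih =>
      intro sign
      simp only [gsumE]
      split_ifs
      · exact ih sign
      · rw [neg_neg, ih sign]
        ring
      · ring

theorem gsumE_sum (cond : List Int) (F : Nat → Int) (W : Nat → Nat → Int) (j : Nat) :
    ∀ (c : Nat) (sign : Int),
      ∑ k ∈ Finset.range j, gsumE cond F (W k) sign c =
        gsumE cond F (fun x => ∑ k ∈ Finset.range j, W k x) sign c := by
  intro c
  induction c with
  | zero =>
      intro sign
      simp only [gsumE]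
      rw [Finset.mul_sum]
  | succ c ih =>
      intro sign
      by_cases h1 : cond.getD c 0 = -1
      · simp only [gsumE, if_pos h1]
        exact ih sign
      · by_cases h2 : cond.getD c 0 = 1
        · simp only [gsumE, if_neg h1, if_pos h2]
          rw [Finset.sum_add_distrib, ih (-sign), Finset.mul_sum]
        · simp only [gsumE, if_neg h1, if_neg h2]
          rw [Finset.mul_sum]

theorem hockey (L : Nat) : ∀ (j : Nat), ∑ a ∈ Finset.range j, ch a L = ch j (L+1) := by
  intro j
  induction j with
  | zero => simp [ch]
  | succ j ih =>
      rw [Finset.sum_range_succ, ih]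
      unfold ch
      have : (j+1).choose (L+1) = j.choose L + j.choose (L+1) := Nat.choose_succ_succ j L
      rw [this]
      push_cast
      ring

-- the S-prefix of the exact row at level p+1, as a gsumE -------------------------

theorem Sstar_of (cond : List Int) (p : Nat) (row : List Int) (hlen : row.length = p + 1)
    (hinv : ∀ k, k ≤ p → row.getD k 0 = gsumE cond (Fv cond) (fun c => ch k (p - c)) 1 p) :
    ∀ k, k ≤ p + 1 →
      S row k = gsumE cond (Fv cond) (fun c => ch k ((p+1) - c)) 1 p := by
  intro k hk
  rw [S_sum row k (by omega)]
  have h1 : ∑ a ∈ Finset.range k, row.getD a 0 =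
      ∑ a ∈ Finset.range k, gsumE cond (Fv cond) (fun c => ch a (p - c)) 1 p := by
    refine Finset.sum_congr rfl (fun a ha => ?_)
    have : a ≤ p := by
      have := Finset.mem_range.mp ha
      omega
    exact hinv a this
  rw [h1, gsumE_sum]
  refine gsumE_congr cond _ _ _ _ p 1 (fun x _ => rfl) (fun x hx => ?_)
  rw [show ∀ L, ∑ a ∈ Finset.range k, ch a L = ch k (L+1) from fun L => hockey L k]
  congr 1
  omega

-- the main invariant: entries of the exact rows are the IE sums ------------------

theorem IE_inv (cond : List Int) : ∀ (p : Nat), p ≤ cond.length → ∀ k, k ≤ p →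
    ((cond.take p).foldl eStep [1]).getD k 0 =
      gsumE cond (Fv cond) (fun c => ch k (p - c)) 1 p := by
  intro p
  induction p with
  | zero =>
      intro _ k hk
      interval_cases k
      show (1 : Int) = 1 * Fv cond 0 * ch 0 0
      simp [Fv, FlE, ch]
  | succ p ih =>
      intro hp k hk
      have hp' : p ≤ cond.length := by omega
      set row := (cond.take p).foldl eStep [1] with hrow
      have hlen : row.length = p + 1 := by
        rw [hrow, rows_lengthE, List.length_take_of_le hp']
        simp [Nat.add_comm]
      have hrow' : (cond.take (p+1)).foldl eStep [1] = eStep row (cond.getD p 0) := by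
        rw [List.take_add_one, List.getElem?_eq_getElem (by omega), Option.toList_some,
            List.foldl_append, List.foldl_cons, List.foldl_nil, hrow]
        congr 1
        rw [List.getD, List.getElem?_eq_getElem (by omega)]
        rfl
      have hstar := Sstar_of cond p row hlen (fun k hk => ih hp' k hk)
      have htotal : S row (p+1) = Fv cond (p+1) := by
        rw [hstar (p+1) (le_refl _), Fv_succ]
      rw [hrow', eStep_entry row _ k (by omega)]
      show _ = gsumE cond (Fv cond) (fun c => ch k (p + 1 - c)) 1 (p+1)
      simp only [gsumE]
      split_ifs with h1 h2
      · exact hstar k hk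
      · rw [hlen, htotal, hstar k hk, gsumE_neg]
        have : ch k (p + 1 - (p+1)) = 1 := by simp [ch]
        rw [this]
        ring
      · rw [hlen, htotal]
        have : ch k (p + 1 - (p+1)) = 1 := by simp [ch]
        rw [this]
        ring

-- A is congruent to the exact IE value -------------------------------------------

theorem A_cong (cond : List Int) (m : Int) :
    countRestrictedPermutation cond m ≡ Fv cond (cond.length + 1) [ZMOD m] := by
  rw [A_model]
  have hbase : ∀ j, j ≤ ([(1:Int)] : List Int).length → D0 j ≡ S [1] j [ZMOD m] := by
    intro j hj
    have : j = 0 ∨ j = 1 := by simpa using Nat.le_one_iff_eq_zero_or_eq_one.mp (by simpa using hj)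
    rcases this with h | h <;> subst h <;> simp [D0, S]
  have hlenr : (cond.foldl eStep [1]).length = cond.length + 1 := by
    rw [rows_lengthE]; simp [Nat.add_comm]
  have hcong := model_congrE m cond D0 [1] hbase (cond.length + 1) (by rw [hlenr])
  have htake : cond.take cond.length = cond := List.take_length
  have hrowlen : ((cond.take cond.length).foldl eStep [1]).length = cond.length + 1 := by
    rw [htake, hlenr]
  have hstar := Sstar_of cond cond.length ((cond.take cond.length).foldl eStep [1]) hrowlen
    (fun k hk => IE_inv cond cond.length (le_refl _) k hk) (cond.length + 1) (le_refl _)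
  rw [htake] at hstar
  have htot : S (cond.foldl eStep [1]) (cond.length + 1) = Fv cond (cond.length + 1) := by
    rw [hstar, Fv_succ]
  have : mrun m cond 2 D0 (cond.length + 1) ≡
      S (cond.foldl eStep [1]) (cond.length + 1) [ZMOD m] := by
    simpa using hcong
  rw [htot] at this
  exact this

-- B-side: Pascal triangle entries are binomials mod m -----------------------------

def pRow (m : Int) : Nat → List Int
  | 0 => [1]
  | i+1 => pascalRow m (pRow m i) (i+1)

theorem pascalTri_eq (m : Int) : ∀ n, pascalTri m n = (List.range (n+1)).map (pRow m) := by
  intro n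
  induction n with
  | zero => rfl
  | succ n ih =>
      unfold pascalTri
      rw [show List.range' 1 (n+1) = List.range' 1 n ++ [n+1] by
            rw [List.range'_1_concat]; norm_num [Nat.add_comm],
          List.foldl_append]
      rw [show (List.range' 1 n).foldl
            (fun C i => C ++ [pascalRow m (C.getD (i-1) []) i]) [[1]] = pascalTri m n from rfl,
          ih]
      rw [List.foldl_cons, List.foldl_nil]
      have hget : ((List.range (n+1)).map (pRow m)).getD (n+1-1) [] = pRow m n := by
        rw [List.getD, List.getElem?_map, List.getElem?_range (by omega)]
        rfl
      rw [hget]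
      rw [show List.range (n+1+1) = List.range (n+1) ++ [n+1] from List.range_succ]
      rw [List.map_append]
      rfl

theorem pascalRow_entry0 (m : Int) (prev : List Int) (i : Nat) :
    (pascalRow m prev i).getD 0 0 = 1 := rfl

theorem pascalRow_entry (m : Int) (prev : List Int) (i k : Nat) (h1 : 1 ≤ k) (h2 : k ≤ i) :
    (pascalRow m prev i).getD k 0 =
      PySem.Int.mod (prev.getD (k-1) 0 + (if k < i then prev.getD k 0 else 0)) m := by
  unfold pascalRow
  obtain ⟨k', rfl⟩ : ∃ k', k = k' + 1 := ⟨k - 1, by omega⟩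
  rw [List.getD, List.getElem?_append_right (by simp), List.getElem?_map]
  simp only [List.length_cons, List.length_nil]
  rw [List.getElem?_range' (by simp; omega)]
  simp only [Option.map_some, Option.getD_some]
  have e : 1 + 1 * (k' + 1 - (0 + 1)) = k' + 1 := by omega
  rw [e]

theorem pRow_entry (m : Int) : ∀ (i k : Nat), k ≤ i →
    (pRow m i).getD k 0 ≡ ch i k [ZMOD m] := by
  intro i
  induction i with
  | zero =>
      intro k hk
      interval_cases k
      simp [pRow, ch]
  | succ i ih =>
      intro k hk
      show (pascalRow m (pRow m i) (i+1)).getD k 0 ≡ ch (i+1) k [ZMOD m]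
      rcases Nat.eq_zero_or_pos k with h0 | h0
      · subst h0
        rw [pascalRow_entry0]
        simp [ch]
      · rw [pascalRow_entry m _ (i+1) k h0 hk]
        refine (pymod_modEq _ m).trans ?_
        by_cases hki : k < i + 1
        · rw [if_pos hki]
          have e1 := ih (k-1) (by omega)
          have e2 := ih k (by omega)
          have : ch (i+1) k = ch i (k-1) + ch i k := by
            unfold ch
            obtain ⟨k', rfl⟩ : ∃ k', k = k' + 1 := ⟨k - 1, by omega⟩
            rw [Nat.choose_succ_succ i k']
            push_cast
            simp
          rw [this]
          exact Int.ModEq.add e1 e2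
        · rw [if_neg hki]
          have hk1 : k = i + 1 := by omega
          subst hk1
          have e1 := ih i (le_refl i)
          have : ch (i+1) (i+1) = ch i i := by simp [ch]
          rw [this]
          simpa using e1
      
-- B-side: bGo computes the IE sum mod m -------------------------------------------

theorem bGo_mod (cond : List Int) (m : Int) (f Ci : List Int) (i : Nat) :
    ∀ (c : Nat) (sign acc : Int), ∃ x, bGo cond m f Ci i c sign acc = PySem.Int.mod x m := by
  intro c
  induction c with
  | zero => intro sign acc; exact ⟨_, rfl⟩
  | succ c ih =>
      intro sign acc
      simp only [bGo]
      split_ifs with h1 h2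
      · exact ih _ _
      · exact ih _ _
      · exact ⟨_, rfl⟩

theorem bGo_congr (cond : List Int) (m : Int) (f Ci : List Int) (i : Nat)
    (hC : ∀ k, k ≤ i → Ci.getD k 0 ≡ ch i k [ZMOD m]) :
    ∀ (c : Nat), c ≤ i → (∀ c', c' ≤ c → f.getD c' 0 ≡ Fv cond c' [ZMOD m]) →
      ∀ (sign acc : Int),
        bGo cond m f Ci i c sign acc ≡
          acc + gsumE cond (Fv cond) (fun c' => ch i (i - c')) sign c [ZMOD m] := by
  intro c
  induction c with
  | zero =>
      intro _ hf sign acc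
      show PySem.Int.mod (acc + sign * f.getD 0 0 * Ci.getD i 0) m ≡
        acc + sign * Fv cond 0 * ch i (i - 0) [ZMOD m]
      refine (pymod_modEq _ m).trans ?_
      refine Int.ModEq.add_left acc ?_
      have h1 := hf 0 (le_refl 0)
      have h2 := hC i (le_refl i)
      have : ch i (i - 0) = ch i i := by norm_num
      rw [this]
      exact (Int.ModEq.mul_left sign h1).mul h2
  | succ c ih =>
      intro hc hf sign acc
      simp only [bGo, gsumE]
      have hterm : sign * f.getD (c+1) 0 * Ci.getD (i-(c+1)) 0 ≡
          sign * Fv cond (c+1) * ch i (i - (c+1)) [ZMOD m] := by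
        have e1 := hf (c+1) (le_refl _)
        have e2 := hC (i-(c+1)) (by omega)
        exact (Int.ModEq.mul_left sign e1).mul e2
      split_ifs with h1 h2
      · -- cond[c] = -1: skip, continue
        exact ih (by omega) (fun c' hc' => hf c' (by omega)) sign acc
      · -- cond[c] = 1: add, flip sign, continue
        have hrec := ih (by omega) (fun c' hc' => hf c' (by omega)) (-sign)
          (PySem.Int.mod (acc + sign * f.getD (c+1) 0 * Ci.getD (i-(c+1)) 0) m)
        refine hrec.trans ?_
        have hmodterm : PySem.Int.mod (acc + sign * f.getD (c+1) 0 * Ci.getD (i-(c+1)) 0) m ≡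
            acc + sign * Fv cond (c+1) * ch i (i-(c+1)) [ZMOD m] :=
          (pymod_modEq _ m).trans (Int.ModEq.add_left acc hterm)
        calc PySem.Int.mod (acc + sign * f.getD (c+1) 0 * Ci.getD (i-(c+1)) 0) m
              + gsumE cond (Fv cond) (fun c' => ch i (i - c')) (-sign) c
            ≡ acc + sign * Fv cond (c+1) * ch i (i-(c+1))
              + gsumE cond (Fv cond) (fun c' => ch i (i - c')) (-sign) c [ZMOD m] :=
              Int.ModEq.add_right _ hmodterm
          _ = acc + (sign * Fv cond (c+1) * ch i (i-(c+1))
              + gsumE cond (Fv cond) (fun c' => ch i (i - c')) (-sign) c) := by ring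
      · -- free: add, break
        refine (pymod_modEq _ m).trans ?_
        exact Int.ModEq.add_left acc hterm

-- B-side: the f loop fills in the Fv values mod m ---------------------------------

theorem f_loop (cond : List Int) (m : Int) (n : Nat) (hn : n = cond.length + 1) :
    ∀ (r k : Nat), k + r = n → ∀ (f : List Int), f.length = n + 1 →
      (∀ c, c ≤ k → f.getD c 0 ≡ Fv cond c [ZMOD m]) →
      (∀ c, 1 ≤ c → c ≤ k → ∃ x, f.getD c 0 = PySem.Int.mod x m) →
      (((List.range' (k+1) r).foldl
          (fun f i => f.set i (bGo cond m f ((pascalTri m n).getD i []) i (i-1) 1 0)) f).getD n 0 ≡ Fv cond n [ZMOD m]) ∧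
      (1 ≤ n → ∃ x, ((List.range' (k+1) r).foldl
          (fun f i => f.set i (bGo cond m f ((pascalTri m n).getD i []) i (i-1) 1 0)) f).getD n 0 = PySem.Int.mod x m) := by
  intro r
  induction r with
  | zero =>
      intro k hk f hfl hcong hmod
      have hkn : k = n := by omega
      subst hkn
      simp only [List.range'_zero, List.foldl_nil]
      exact ⟨hcong _ (le_refl _), fun h1 => hmod _ h1 (le_refl _)⟩
  | succ r ih =>
      intro k hk f hfl hcong hmod
      rw [List.range'_succ, List.foldl_cons]
      have hkn : k + 1 ≤ n := by omega
      set v := bGo cond m f ((pascalTri m n).getD (k+1) []) (k+1) ((k+1)-1) 1 0 with hv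
      have hCi : ∀ j, j ≤ k+1 → ((pascalTri m n).getD (k+1) []).getD j 0 ≡ ch (k+1) j [ZMOD m] := by
        intro j hj
        rw [pascalTri_eq]
        have : ((List.range (n+1)).map (pRow m)).getD (k+1) [] = pRow m (k+1) := by
          rw [List.getD, List.getElem?_map, List.getElem?_range (by omega)]
          rfl
        rw [this]
        exact pRow_entry m (k+1) j hj
      have hvc : v ≡ Fv cond (k+1) [ZMOD m] := by
        have h := bGo_congr cond m f ((pascalTri m n).getD (k+1) []) (k+1) hCi k (by omega)
          (fun c' hc' => hcong c' hc') 1 0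
        rw [hv]
        refine h.trans ?_
        rw [zero_add, Fv_succ]
      have hvm : ∃ x, v = PySem.Int.mod x m := bGo_mod cond m f _ (k+1) _ 1 0
      refine ih (k+1) (by omega) (f.set (k+1) v) (by simp [hfl]) ?_ ?_
      · intro c hc
        by_cases he : c = k+1
        · subst he
          rw [getD_set_eq _ _ _ (by omega)]
          exact hvc
        · rw [getD_set_ne _ _ _ _ (fun h => he h.symm)]
          exact hcong c (by omega)
      · intro c h1 hc
        by_cases he : c = k+1
        · subst he
          rw [getD_set_eq _ _ _ (by omega)]
          exact hvm
        · rw [getD_set_ne _ _ _ _ (fun h => he h.symm)]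
          exact hmod c h1 (by omega)

-- main equivalence ----------------------------------------------------------------

theorem B_val (cond : List Int) (m : Int) :
    countRestrictedPermutation_alt cond m ≡ Fv cond (cond.length + 1) [ZMOD m] ∧
    ∃ x, countRestrictedPermutation_alt cond m = PySem.Int.mod x m := by
  have hinit1 : (([1] ++ List.replicate (cond.length + 1) (0:Int))).length = (cond.length + 1) + 1 := by
    simp [Nat.add_comm]
  have hinit2 : ∀ c, c ≤ 0 →
      (([1] ++ List.replicate (cond.length + 1) (0:Int))).getD c 0 ≡ Fv cond c [ZMOD m] := by
    intro c hc
    have : c = 0 := by omega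
    subst this
    show (1 : Int) ≡ Fv cond 0 [ZMOD m]
    rfl
  obtain ⟨hcong, hmod⟩ := f_loop cond m (cond.length + 1) rfl (cond.length + 1) 0
    (by omega) ([1] ++ List.replicate (cond.length + 1) (0:Int)) hinit1 hinit2
    (by intro c h1 h2; omega)
  constructor
  · exact hcong
  · exact hmod (by omega)

theorem main_eq (cond : List Int) (m : Int) (hm : m ≠ 0) (hne : cond ≠ []) :
    countRestrictedPermutation cond m = countRestrictedPermutation_alt cond m := by
  obtain ⟨c, cs, rfl⟩ : ∃ c cs, cond = c :: cs := by
    cases cond with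
    | nil => exact absurd rfl hne
    | cons c cs => exact ⟨c, cs, rfl⟩
  have hA := A_cong (c :: cs) m
  obtain ⟨hB, y, hy⟩ := B_val (c :: cs) m
  have hAx : ∃ x, countRestrictedPermutation (c :: cs) m = PySem.Int.mod x m := by
    rw [A_model]
    show ∃ x, mrun m cs 3 (mstep m c 2 D0) ((c :: cs).length + 1) = PySem.Int.mod x m
    refine mrun_mod m cs 3 (by omega) _ ?_ _ (by omega)
    intro j hj
    unfold mstep
    obtain ⟨k, hk⟩ : ∃ k, min j 2 = k + 1 := ⟨min j 2 - 1, by omega⟩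
    rw [hk]
    exact ⟨_, rfl⟩
  obtain ⟨x, hx⟩ := hAx
  have hxy : x ≡ y [ZMOD m] := by
    have e1 : (x : Int) ≡ countRestrictedPermutation (c :: cs) m [ZMOD m] := by
      rw [hx]; exact (pymod_modEq x m).symm
    have e2 : countRestrictedPermutation_alt (c :: cs) m ≡ y [ZMOD m] := by
      rw [hy]; exact pymod_modEq y m
    exact ((e1.trans hA).trans hB.symm).trans e2
  rw [hx, hy]
  exact pymod_congr hm hxy

-- the B value on empty cond, explicitly --------------------------------------------

theorem B_empty (m : Int) : countRestrictedPermutation_alt [] m =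
    PySem.Int.mod (0 + 1 * 1 * PySem.Int.mod (1 + 0) m) m := rfl

-- ===== VERDICT (by name: the statement is the Claim_ definition above) =====
theorem countRestrictedPermutation_spec : Claim_unchanged_countRestrictedPermutation := by
  intro cond m _ hpre hnd
  by_cases hc : cond = []
  · subst hc
    have hm : ¬ (m = 1 ∨ m < 0) := fun h => hnd ⟨rfl, h⟩
    have hm2 : 2 ≤ m := by
      rcases lt_or_gt_of_ne hpre with h | h
      · exact absurd (Or.inr h) hm
      · rcases eq_or_lt_of_le (Int.add_one_le_iff.mpr h) with h1 | h1
        · exact absurd (Or.inl h1.symm) hm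
        · omega
    show countRestrictedPermutation [] m = countRestrictedPermutation_alt [] m
    have hA : countRestrictedPermutation [] m = 1 := rfl
    have hmod1 : PySem.Int.mod 1 m = 1 := pymod_small (by norm_num) (by omega)
    have e1 : ((1:Int) + 0) = 1 := by ring
    have e2 : ((0:Int) + 1 * 1 * 1) = 1 := by ring
    rw [hA, B_empty, e1, hmod1, e2, hmod1]
  · exact main_eq cond m hpre hc

theorem countRestrictedPermutation_changed : Claim_changed_countRestrictedPermutation := by
  unfold Claim_changed_countRestrictedPermutation; decide

theorem countRestrictedPermutation_tight : Claim_exact_countRestrictedPermutation := by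
  intro cond m _ hpre hd
  rcases hd with ⟨hc, hm⟩
  subst hc
  have hA : countRestrictedPermutation [] m = 1 := rfl
  rw [hA, B_empty]
  rcases hm with h1 | hneg
  · subst h1
    have := PySem.Int.mod_lt (0 + 1 * 1 * PySem.Int.mod (1 + 0) 1) (b := 1) (by norm_num)
    have := PySem.Int.mod_nonneg (0 + 1 * 1 * PySem.Int.mod (1 + 0) 1) (b := 1) (by norm_num)
    omega
  · have := (PySem.Int.mod_neg_bounds (0 + 1 * 1 * PySem.Int.mod (1 + 0) m) hneg).2
    omega
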